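-- pv_equiv track=rewrite | github.com/Yaachaka/pyPractice1 | bhch13/bhch13exrc18.py | base20
-- ===== SOURCE A (Python) =====
-- base20_dict = {0:'A', 1:'B', 2:'C', 3:'D', 4:'E', 5:'F', 6:'G', 7:'H', 8:'I', 9:'J', 10:'K', 11:'L', 12:'M', 13:'N', 14:'O', 15:'P', 16:'Q', 17:'R', 18:'S', 19:'T'}
--
-- def base20(n):
-- 	b20 = []
-- 	if n < 20:
-- 		return base20_dict[n]
-- 	else:
-- 		b20.insert(0, base20_dict[n%20])
-- 		b20.insert(0, base20(n//20))
-- 		return ''.join(b20)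
-- ===== SOURCE B (Python) =====
-- LETTERS = "ABCDEFGHIJKLMNOPQRST"
--
-- def base20(n):
--     if n < 20:
--         return LETTERS[n]
--     digits = []
--     while n:
--         digits.append(LETTERS[n % 20])
--         n //= 20
--     return ''.join(reversed(digits))
-- ===== Notes on version B (the rewrite author's own statement) =====
-- stated objective: alternative
-- what changed: Replaces A's recursion on the quotient (building the string top-down via recursive calls and list insert(0,...)) by an iterative least-significant-digit-first loop over a letter string that collects digits and joins them reversed.
import Mathlib
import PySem

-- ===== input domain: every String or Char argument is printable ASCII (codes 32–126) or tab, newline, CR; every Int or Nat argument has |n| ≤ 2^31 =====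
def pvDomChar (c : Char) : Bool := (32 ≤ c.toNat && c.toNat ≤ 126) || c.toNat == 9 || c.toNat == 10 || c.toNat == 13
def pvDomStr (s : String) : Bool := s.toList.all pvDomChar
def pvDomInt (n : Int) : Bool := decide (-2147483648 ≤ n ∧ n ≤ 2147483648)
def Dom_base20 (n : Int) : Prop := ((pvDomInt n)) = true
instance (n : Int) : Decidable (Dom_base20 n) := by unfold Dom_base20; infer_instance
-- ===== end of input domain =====

-- B replaces A's quotient recursion by an iterative digit loop (same values, alternative decomposition).

-- ===== PORT A =====
def base20Dict : PySem.Dict Int String := PySem.Dict.ofList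
  [(0,"A"), (1,"B"), (2,"C"), (3,"D"), (4,"E"), (5,"F"), (6,"G"), (7,"H"), (8,"I"), (9,"J"),
   (10,"K"), (11,"L"), (12,"M"), (13,"N"), (14,"O"), (15,"P"), (16,"Q"), (17,"R"), (18,"S"), (19,"T")]

-- base20_dict[k]; Python raises KeyError when k ∉ dict (i.e. k < 0 here) — those inputs are excluded by Pre_
def aLookup (k : Int) : String := (PySem.Dict.get? base20Dict k).getD ""

def base20 (n : Int) : String :=
  if n < 20 then aLookup n
  else
    -- b20 = []; b20.insert(0, dict[n%20]); b20.insert(0, base20(n//20)); ''.join(b20)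
    PySem.Str.join "" [base20 (PySem.Int.floordiv n 20), aLookup (PySem.Int.mod n 20)]
termination_by n.toNat
decreasing_by
  rw [PySem.Int.floordiv_eq_ediv_of_pos (by omega : (0:Int) < 20)]
  omega

-- ===== PORT B =====
def bLetters : String := "ABCDEFGHIJKLMNOPQRST"

-- LETTERS[k]: a one-character string; Python raises IndexError out of range — excluded by Pre_
def bLetter (k : Int) : String := ((PySem.Str.pyGet? bLetters k).map (fun c => String.ofList [c])).getD ""

-- while n: digits.append(LETTERS[n % 20]); n //= 20
-- (the loop is only entered with n ≥ 20; the guard '0 < n' equals Python's 'while n' on the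
--  nonnegative values the loop ever sees, and makes the recursion total)
def bLoop (n : Int) (digits : List String) : List String :=
  if 0 < n then bLoop (PySem.Int.floordiv n 20) (digits ++ [bLetter (PySem.Int.mod n 20)])
  else digits
termination_by n.toNat
decreasing_by
  rw [PySem.Int.floordiv_eq_ediv_of_pos (by omega : (0:Int) < 20)]
  omega

def base20_alt (n : Int) : String :=
  if n < 20 then bLetter n
  else PySem.Str.join "" (bLoop n []).reverse

-- ===== PRECONDITION & SPEC =====
-- Pre_ excludes n < 0, on which the Python A raises KeyError (base20_dict has keys 0..19 only).
def Pre_base20 (n : Int) : Prop := 0 ≤ n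
instance (n : Int) : Decidable (Pre_base20 n) := by unfold Pre_base20; infer_instance
def pvWitness_base20 : Int := (27)
def Spec_base20 (n : Int) (out : String) : Prop := out = base20_alt n
instance (n : Int) (out : String) : Decidable (Spec_base20 n out) := by unfold Spec_base20; infer_instance

-- ===== CLAIM (what is proved, stated in full; the proofs are below) =====
def Claim_equal_base20 : Prop := ∀ (n : Int), Dom_base20 n → Pre_base20 n → Spec_base20 n (base20 n)

-- ===== LEMMAS AND PROOFS =====

-- the two digit tables agree on the shared domain 0..19
theorem lookup_eq_letter (k : Int) (h0 : 0 <= k) (h1 : k < 20) : aLookup k = bLetter k := by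
  interval_cases k <;> rfl

theorem flatten_intersperse_nil (l : List (List Char)) :
    (List.intersperse ([] : List Char) l).flatten = l.flatten := by
  induction l with
  | nil => rfl
  | cons x xs ih =>
    cases xs with
    | nil => rfl
    | cons y ys =>
      show (x :: [] :: List.intersperse [] (y :: ys)).flatten = _
      simp only [List.flatten_cons] at ih ⊢
      simp [ih]

-- ''.join with empty separator is concatenation
theorem chars_join_nil_sep (l : List (List Char)) : PySem.Chars.join [] l = l.flatten := by
  simp only [PySem.Chars.join, List.intercalate]
  exact flatten_intersperse_nil l

theorem join_append_str (xs ys : List String) :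
    PySem.Str.join "" (xs ++ ys) = PySem.Str.join "" xs ++ PySem.Str.join "" ys := by
  simp [PySem.Str.join, chars_join_nil_sep, String.ofList_append]

theorem join_single_str (s : String) : PySem.Str.join "" [s] = s := by
  simp [PySem.Str.join]

theorem bLoop_zero_of_nonpos (n : Int) (h : ¬ 0 < n) (ds : List String) : bLoop n ds = ds := by
  rw [bLoop, if_neg h]

theorem bLoop_shift (m : Nat) : ∀ n : Int, n.toNat = m → ∀ ds, bLoop n ds = ds ++ bLoop n [] := by
  induction m using Nat.strong_induction_on with
  | _ m ih =>
    intro n hm ds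
    by_cases h : 0 < n
    · have hq : (PySem.Int.floordiv n 20).toNat < m := by
        rw [PySem.Int.floordiv_eq_ediv_of_pos (by omega : (0:Int) < 20)]; omega
      have e1 : bLoop n ds = bLoop (PySem.Int.floordiv n 20) (ds ++ [bLetter (PySem.Int.mod n 20)]) := by
        rw [bLoop, if_pos h]
      have e2 : bLoop n [] = bLoop (PySem.Int.floordiv n 20) ([] ++ [bLetter (PySem.Int.mod n 20)]) := by
        rw [bLoop, if_pos h]
      rw [e1, e2, ih _ hq _ rfl (ds ++ [bLetter (PySem.Int.mod n 20)]),
          ih _ hq _ rfl ([] ++ [bLetter (PySem.Int.mod n 20)])]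
      simp
    · rw [bLoop_zero_of_nonpos n h ds, bLoop_zero_of_nonpos n h []]
      simp

theorem bLoop_eq_base20 (m : Nat) : ∀ n : Int, n.toNat = m → 0 < n →
    PySem.Str.join "" (bLoop n []).reverse = base20 n := by
  induction m using Nat.strong_induction_on with
  | _ m ih =>
    intro n hm h
    have hdiv : PySem.Int.floordiv n 20 = n / 20 :=
      PySem.Int.floordiv_eq_ediv_of_pos (by omega : (0:Int) < 20)
    have hmod : PySem.Int.mod n 20 = n % 20 :=
      PySem.Int.mod_eq_emod_of_pos (by omega : (0:Int) < 20)
    have e0 : bLoop n [] = [bLetter (PySem.Int.mod n 20)] ++ bLoop (PySem.Int.floordiv n 20) [] := by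
      rw [bLoop, if_pos h,
          bLoop_shift (PySem.Int.floordiv n 20).toNat _ rfl ([] ++ [bLetter (PySem.Int.mod n 20)])]
      simp
    by_cases hsmall : n < 20
    · have hq0 : ¬ 0 < PySem.Int.floordiv n 20 := by rw [hdiv]; omega
      have hmn : PySem.Int.mod n 20 = n := by rw [hmod]; omega
      rw [e0, bLoop_zero_of_nonpos _ hq0 []]
      simp only [List.append_nil, List.reverse_singleton]
      rw [join_single_str, hmn, base20, if_pos hsmall]
      exact (lookup_eq_letter n (by omega) hsmall).symm
    · have hq : (PySem.Int.floordiv n 20).toNat < m := by rw [hdiv]; omega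
      have hqpos : 0 < PySem.Int.floordiv n 20 := by rw [hdiv]; omega
      rw [e0]
      rw [List.singleton_append, List.reverse_cons, join_append_str, join_single_str, ih _ hq _ rfl hqpos]
      conv_rhs => rw [base20, if_neg hsmall]
      have : ([base20 (PySem.Int.floordiv n 20), aLookup (PySem.Int.mod n 20)] : List String)
          = [base20 (PySem.Int.floordiv n 20)] ++ [aLookup (PySem.Int.mod n 20)] := rfl
      rw [this, join_append_str, join_single_str, join_single_str,
          lookup_eq_letter _ (PySem.Int.mod_nonneg n (by omega)) (PySem.Int.mod_lt n (by omega))]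

-- ===== VERDICT (by name: the statement is the Claim_ definition above) =====
theorem base20_spec : Claim_equal_base20 := by
  intro n _ hp
  unfold Spec_base20
  by_cases hsmall : n < 20
  · rw [base20, if_pos hsmall, base20_alt, if_pos hsmall]
    exact lookup_eq_letter n hp hsmall
  · rw [base20_alt, if_neg hsmall]
    exact (bLoop_eq_base20 n.toNat n rfl (by omega)).symm
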